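-- pv_equiv track=rewrite | github.com/miseop25/Back_Jun_Code_Study | Programmers/월간_코드_챌린지_시즌1/September/num3/test3_ver1.py | solution
-- ===== SOURCE A (Python) =====
-- def solution(a):
--     if len(a) < 3 :
--         return len(a)
--     answer = 2
--
--     x = min(a[:1])
--     y = min(a[2:])
--
--     for i in range(1, len(a)-1) :
--         if a[i] < x or a[i] < y :
--             if a[i] < x :
--                 x = a[i]
--             answer +=1
--
--         if a[i+1] == y  and i+2 < len(a):
--             y = min(a[i+2:])
--
--     return answer
-- ===== SOURCE B (Python) =====
-- def solution(a):
--     n = len(a)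
--     if n < 3:
--         return n
--     # suffix minima: suf[i] == min(a[i:]), built in one backward pass
--     suf = []
--     m = a[-1]
--     for v in reversed(a):
--         m = min(m, v)
--         suf.append(m)
--     suf.reverse()
--     ans = 2
--     x = a[0]
--     for i in range(1, n - 1):
--         if a[i] < x or a[i] < suf[i + 1]:
--             ans += 1
--         x = min(x, a[i])
--     return ans
-- ===== Notes on version B (the rewrite author's own statement) =====
-- stated objective: faster
-- what changed: replaces A's repeated min(a[i+2:]) rescans (lazily refreshed suffix minimum) with a suffix-minimum array precomputed in one backward pass, so each loop step is O(1)
import Mathlib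
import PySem

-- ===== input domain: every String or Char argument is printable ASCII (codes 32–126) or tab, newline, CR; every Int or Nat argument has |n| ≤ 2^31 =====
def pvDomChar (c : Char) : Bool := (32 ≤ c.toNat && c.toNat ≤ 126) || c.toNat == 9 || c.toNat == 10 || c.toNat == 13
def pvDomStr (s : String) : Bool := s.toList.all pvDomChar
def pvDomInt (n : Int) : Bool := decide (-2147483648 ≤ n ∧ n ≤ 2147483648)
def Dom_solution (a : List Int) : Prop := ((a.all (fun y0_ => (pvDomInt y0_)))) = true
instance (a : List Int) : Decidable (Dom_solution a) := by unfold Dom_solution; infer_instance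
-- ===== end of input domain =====

-- B replaces A's repeated min(a[i+2:]) rescans with a suffix-minimum array built in
-- one backward pass (objective: faster, asymptotic).

-- ===== PORT A =====
def solution (a : List Int) : Int :=
  if a.length < 3 then (a.length : Int)
  else
    let x0 : Int := (PySem.List.min? (PySem.List.slice a none (some 1)) (fun v => v)).getD 0
    let y0 : Int := (PySem.List.min? (PySem.List.slice a (some 2) none) (fun v => v)).getD 0
    let st := (PySem.List.pyRange 1 ((a.length : Int) - 1) 1).foldl
      (fun (s : Int × Int × Int) i =>
        let ai := PySem.List.pyGetD a i 0
        let s1 : Int × Int × Int :=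
          if ai < s.1 ∨ ai < s.2.1 then
            ((if ai < s.1 then ai else s.1), s.2.1, s.2.2 + 1)
          else s
        if PySem.List.pyGetD a (i + 1) 0 = s1.2.1 ∧ i + 2 < (a.length : Int) then
          (s1.1, (PySem.List.min? (PySem.List.slice a (some (i + 2)) none) (fun v => v)).getD 0, s1.2.2)
        else s1)
      (x0, y0, 2)
    st.2.2

-- ===== PORT B =====
def solution_alt (a : List Int) : Int :=
  let n := a.length
  if n < 3 then (n : Int)
  else
    -- suffix minima, one backward pass (reversed(a) with a running min, then reverse)
    let st := a.reverse.foldl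
      (fun (s : Int × List Int) v =>
        let m := min s.1 v
        (m, s.2 ++ [m]))
      (PySem.List.pyGetD a (-1) 0, [])
    let suf := st.2.reverse
    let st2 := (PySem.List.pyRange 1 ((n : Int) - 1) 1).foldl
      (fun (s : Int × Int) i =>
        let ai := PySem.List.pyGetD a i 0
        let ans := if ai < s.2 ∨ ai < PySem.List.pyGetD suf (i + 1) 0 then s.1 + 1 else s.1
        (ans, min s.2 ai))
      (2, PySem.List.pyGetD a 0 0)
    st2.1

-- ===== PRECONDITION & SPEC =====
def Spec_solution (a : List Int) (out : Int) : Prop := out = solution_alt a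
instance (a : List Int) (out : Int) : Decidable (Spec_solution a out) := by unfold Spec_solution; infer_instance

-- ===== CLAIM (what is proved, stated in full; the proofs are below) =====
def Claim_equal_solution : Prop := ∀ (a : List Int), Dom_solution a → Spec_solution a (solution a)

-- ===== LEMMAS AND PROOFS =====

/-- `min(l)` as the ports compute it (0 for the empty list, never reached). -/
def pvMin (l : List Int) : Int := (PySem.List.min? l (fun v => v)).getD 0

theorem pvMin_cons (h : Int) (t : List Int) : pvMin (h :: t) = t.foldl min h := by
  simp [pvMin, PySem.List.min?_id_cons]

theorem foldl_min_eq (m h : Int) (t : List Int) :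
    (h :: t).foldl min m = min m (pvMin (h :: t)) := by
  simp [List.foldl, pvMin_cons]
  exact List.foldl_assoc

theorem pvMin_cons' (h : Int) (t : List Int) (ht : t ≠ []) :
    pvMin (h :: t) = min h (pvMin t) := by
  obtain ⟨h', t', rfl⟩ := List.exists_cons_of_ne_nil ht
  rw [pvMin_cons]
  exact foldl_min_eq h h' t'

theorem pvMin_mem (l : List Int) (hl : l ≠ []) : pvMin l ∈ l := by
  obtain ⟨h, t, rfl⟩ := List.exists_cons_of_ne_nil hl
  have := PySem.List.min?_mem (xs := h :: t) (key := fun v => v) (m := t.foldl min h)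
    (PySem.List.min?_id_cons h t)
  simpa [pvMin_cons] using this

theorem pvMin_le (l : List Int) (x : Int) (hx : x ∈ l) : pvMin l ≤ x := by
  obtain ⟨h, t, rfl⟩ := List.exists_cons_of_ne_nil (List.ne_nil_of_mem hx)
  have := PySem.List.min?_isMin (xs := h :: t) (key := fun v => v) (m := t.foldl min h)
    (PySem.List.min?_id_cons h t) x hx
  simpa [pvMin_cons] using this

theorem pvMin_reverse (l : List Int) : pvMin l.reverse = pvMin l := by
  rcases eq_or_ne l [] with rfl | hl
  · rfl
  · have hr : l.reverse ≠ [] := by simpa using hl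
    apply le_antisymm
    · exact pvMin_le _ _ (by simpa using pvMin_mem l hl)
    · exact pvMin_le _ _ (by simpa using pvMin_mem l.reverse hr)

/-- the values appended by B's backward pass -/
def pvScan : List Int → Int → List Int
  | [], _ => []
  | v :: t, m => (min m v) :: pvScan t (min m v)

theorem fold_snd (l : List Int) : ∀ (m : Int) (s : List Int),
    (l.foldl (fun (s : Int × List Int) v =>
        let m := min s.1 v
        (m, s.2 ++ [m])) (m, s)).2 = s ++ pvScan l m := by
  induction l with
  | nil => simp [pvScan]
  | cons v t ih => intro m s; simp [List.foldl, pvScan, ih]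

theorem pvScan_append (l : List Int) : ∀ (v m : Int),
    pvScan (l ++ [v]) m = pvScan l m ++ [min (l.foldl min m) v] := by
  induction l with
  | nil => intro v m; simp [pvScan]
  | cons u t ih => intro v m; simp [pvScan, List.foldl, ih]

theorem foldl_min_eq' (m : Int) (l : List Int) (hl : l ≠ []) :
    l.foldl min m = min m (pvMin l) := by
  obtain ⟨h, t, rfl⟩ := List.exists_cons_of_ne_nil hl
  exact foldl_min_eq m h t

theorem pvScan_rev (l : List Int) (hl : l ≠ []) : ∀ (m : Int), l.getLast hl ≤ m →
    (pvScan l.reverse m).reverse = (List.range l.length).map (fun j => pvMin (l.drop j)) := by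
  induction l with
  | nil => exact absurd rfl hl
  | cons h t ih =>
    intro m hm
    rcases eq_or_ne t [] with rfl | ht
    · simp at hm
      simp [pvScan, pvMin, PySem.List.min?_id_cons, min_eq_right hm, List.range_succ]
    · have hlast : t.getLast ht ≤ m := by rwa [List.getLast_cons ht] at hm
      have hmem : t.getLast ht ∈ t := List.getLast_mem ht
      have hMle : pvMin t ≤ m := le_trans (pvMin_le t _ hmem) hlast
      have hrevne : t.reverse ≠ [] := by simpa using ht
      have hhead : t.reverse.foldl min m = pvMin t := by
        rw [foldl_min_eq' m t.reverse hrevne, pvMin_reverse, min_eq_right hMle]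
      rw [List.reverse_cons, pvScan_append, List.reverse_append, hhead]
      rw [ih ht m hlast]
      simp only [List.reverse_singleton, List.singleton_append, List.length_cons,
        List.range_succ_eq_map, List.map_cons, List.map_map, List.drop_zero]
      rw [pvMin_cons' h t ht, min_comm]
      simp [Function.comp_def]

theorem loops_eq (a : List Int) (suf : List Int)
    (hsuf : ∀ i : Int, 0 ≤ i → i < (a.length : Int) →
      PySem.List.pyGetD suf i 0 = pvMin (a.drop i.toNat)) :
    ∀ (k : ℕ) (i x y ans : Int), (a.length : Int) - 1 - i ≤ k → 1 ≤ i →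
    (i < (a.length : Int) - 1 → y = pvMin (a.drop (i + 1).toNat)) →
    ((PySem.List.pyRange i ((a.length : Int) - 1) 1).foldl
      (fun (s : Int × Int × Int) i =>
        let ai := PySem.List.pyGetD a i 0
        let s1 : Int × Int × Int :=
          if ai < s.1 ∨ ai < s.2.1 then
            ((if ai < s.1 then ai else s.1), s.2.1, s.2.2 + 1)
          else s
        if PySem.List.pyGetD a (i + 1) 0 = s1.2.1 ∧ i + 2 < (a.length : Int) then
          (s1.1, (PySem.List.min? (PySem.List.slice a (some (i + 2)) none) (fun v => v)).getD 0, s1.2.2)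
        else s1)
      (x, y, ans)).2.2
    = ((PySem.List.pyRange i ((a.length : Int) - 1) 1).foldl
      (fun (s : Int × Int) i =>
        let ai := PySem.List.pyGetD a i 0
        let ans := if ai < s.2 ∨ ai < PySem.List.pyGetD suf (i + 1) 0 then s.1 + 1 else s.1
        (ans, min s.2 ai))
      (ans, x)).1 := by
  intro k
  induction k with
  | zero =>
    intro i x y ans hk hi _
    rw [PySem.List.pyRange_one_eq_nil (by omega)]
    rfl
  | succ k ih =>
    intro i x y ans hk hi hy
    by_cases hlt : i < (a.length : Int) - 1
    · have hy1 := hy hlt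
      have hsufy : PySem.List.pyGetD suf (i + 1) 0 = y := by
        rw [hsuf (i + 1) (by omega) (by omega)]; exact hy1.symm
      have h12 : (i + 1 + 1 : Int) = i + 2 := by ring
      have hynew : (PySem.List.min? (PySem.List.slice a (some (i + 2)) none)
          (fun v => v)).getD 0 = pvMin (a.drop (i + 2).toNat) := by
        rw [PySem.List.slice_from a (by omega)]; rfl
      -- if a[i+1] differs from the running suffix min, the suffix min is unchanged
      have hkeep : i + 1 < (a.length : Int) - 1 → PySem.List.pyGetD a (i + 1) 0 ≠ y →
          y = pvMin (a.drop (i + 2).toNat) := by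
        intro h2 hne
        have hb1 : (0 : Int) ≤ i + 1 := by omega
        have hb2 : i + 1 < (a.length : Int) := by omega
        have hget : PySem.List.pyGetD a (i + 1) 0 = a[(i + 1).toNat] :=
          PySem.List.pyGetD_eq_getElem a 0 hb1 hb2
        have hdrop : a.drop (i + 1).toNat = a[(i + 1).toNat] :: a.drop (i + 2).toNat := by
          have h' : (i + 2).toNat = (i + 1).toNat + 1 := by omega
          rw [h']
          exact List.drop_eq_getElem_cons (by omega)
        have htail : a.drop (i + 2).toNat ≠ [] := by
          have : (a.drop (i + 2).toNat).length = a.length - (i + 2).toNat := by simp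
          intro hnil
          rw [hnil] at this
          simp at this
          omega
        have hmin : pvMin (a.drop (i + 1).toNat)
            = min (a[(i + 1).toNat]) (pvMin (a.drop (i + 2).toNat)) := by
          rw [hdrop, pvMin_cons' _ _ htail]
        rcases min_cases (a[(i + 1).toNat]) (pvMin (a.drop (i + 2).toNat)) with ⟨he, _⟩ | ⟨he, _⟩
        · exact absurd (by rw [hget, hy1, hmin, he]) hne
        · rw [hy1, hmin, he]
      rw [PySem.List.pyRange_one_cons hlt, List.foldl_cons, List.foldl_cons]
      simp only [hsufy]
      by_cases hc1 : PySem.List.pyGetD a i 0 < x ∨ PySem.List.pyGetD a i 0 < y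
      · simp only [if_pos hc1]
        have hxm : (if PySem.List.pyGetD a i 0 < x then PySem.List.pyGetD a i 0 else x)
            = min x (PySem.List.pyGetD a i 0) := by
          rw [min_def]; split_ifs <;> omega
        by_cases hc2 : PySem.List.pyGetD a (i + 1) 0 = y ∧ i + 2 < (a.length : Int)
        · simp only [if_pos hc2, hxm, hynew]
          exact ih (i + 1) _ _ _ (by omega) (by omega)
            (fun _ => by rw [h12])
        · simp only [if_neg hc2, hxm]
          refine ih (i + 1) _ _ _ (by omega) (by omega) (fun h2 => ?_)
          rw [h12]
          rcases not_and_or.mp hc2 with hne | hge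
          · exact hkeep h2 hne
          · omega
      · simp only [if_neg hc1]
        have hxm : min x (PySem.List.pyGetD a i 0) = x := min_eq_left (by omega)
        rw [hxm]
        by_cases hc2 : PySem.List.pyGetD a (i + 1) 0 = y ∧ i + 2 < (a.length : Int)
        · simp only [if_pos hc2, hynew]
          exact ih (i + 1) _ _ _ (by omega) (by omega) (fun _ => by rw [h12])
        · simp only [if_neg hc2]
          refine ih (i + 1) _ _ _ (by omega) (by omega) (fun h2 => ?_)
          rw [h12]
          rcases not_and_or.mp hc2 with hne | hge
          · exact hkeep h2 hne
          · omega
    · rw [PySem.List.pyRange_one_eq_nil (by omega)]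
      rfl

-- ===== VERDICT (by name: the statement is the Claim_ definition above) =====
theorem solution_spec : Claim_equal_solution := by
  intro a _
  unfold Spec_solution solution solution_alt
  by_cases h3 : a.length < 3
  · simp only [if_pos h3]
  · simp only [if_neg h3]
    have hne : a ≠ [] := by intro h; rw [h] at h3; simp at h3
    have hlen3 : 3 ≤ a.length := by omega
    have hm0 : PySem.List.pyGetD a (-1) 0 = a.getLast hne := PySem.List.pyGetD_neg_one a 0 hne
    have hsufeq : ((a.reverse.foldl
        (fun (s : Int × List Int) v =>
          let m := min s.1 v
          (m, s.2 ++ [m]))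
        (PySem.List.pyGetD a (-1) 0, [])).2).reverse
        = (List.range a.length).map (fun j => pvMin (a.drop j)) := by
      rw [fold_snd, hm0, List.nil_append]
      exact pvScan_rev a hne _ le_rfl
    have hsufget : ∀ i : Int, 0 ≤ i → i < (a.length : Int) →
        PySem.List.pyGetD ((a.reverse.foldl
          (fun (s : Int × List Int) v =>
            let m := min s.1 v
            (m, s.2 ++ [m]))
          (PySem.List.pyGetD a (-1) 0, [])).2).reverse i 0 = pvMin (a.drop i.toNat) := by
      intro i h0 h1
      rw [hsufeq]
      rw [PySem.List.pyGetD_eq_getElem _ _ h0 (by simpa using h1)]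
      simp
    have hcons : a = a[0] :: a.drop 1 := by
      simpa using List.drop_eq_getElem_cons (show 0 < a.length by omega)
    have hx0 : (PySem.List.min? (PySem.List.slice a none (some 1)) (fun v => v)).getD 0
        = PySem.List.pyGetD a 0 0 := by
      rw [PySem.List.slice_to a (by norm_num)]
      rw [PySem.List.pyGetD_eq_getElem a 0 le_rfl (by omega)]
      conv_lhs => rw [hcons]
      simp [PySem.List.min?_id_cons]
    have hy0 : 1 < (a.length : Int) - 1 →
        (PySem.List.min? (PySem.List.slice a (some 2) none) (fun v => v)).getD 0
        = pvMin (a.drop ((1 : Int) + 1).toNat) := by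
      intro _
      rw [PySem.List.slice_from a (by norm_num)]
      rfl
    rw [hx0]
    exact loops_eq a _ hsufget a.length 1 _ _ 2 (by omega) le_rfl hy0
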